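-- pv_equiv track=rewrite | github.com/nOOne-is-hier/TIS | SWEA/22576.근의_공식/22576.근의_공식4.py | solve_quadratic_mod2k
-- ===== SOURCE A (Python) =====
-- def safe_mod(a, m):
--     try:
--         return a % m
--     except ZeroDivisionError:
--         return -1
--
-- def solve_quadratic_mod2k(a, b, c, k):
--     try:
--         if k <= 0:
--             return -1
--         if k == 1:
--             return 0 if c % 2 == 0 else -1
--
--         if a % 2 == b % 2 == 0:
--             if c % 2 == 1:
--                 return -1
--             x = solve_quadratic_mod2k(a // 2, b // 2, c // 2, k - 1)
--             return -1 if x == -1 else safe_mod(x * 2, 1 << k)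
--
--         if a % 2 == 0:
--             if b % 2 == 0:
--                 return -1
--             try:
--                 return safe_mod(-c * pow(b, -1, 1 << k), 1 << k)
--             except ValueError:
--                 return -1
--
--         x = 0
--         for i in range(k):
--             try:
--                 px = safe_mod(a * x * x + b * x + c, 1 << (i + 1))
--                 if px != 0 and safe_mod(a * 2 * x + b, 2) == 1:
--                     x = safe_mod(x + (1 << i), 1 << k)
--             except OverflowError:
--                 return -1
--         return x
--     except Exception:
--         return -1
-- ===== SOURCE B (Python) =====
-- def solve_quadratic_mod2k(a, b, c, k):
--     shift = 0
--     # iterative descent replacing A's recursion on the all-even case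
--     while k > 1 and a % 2 == 0 and b % 2 == 0:
--         if c % 2 == 1:
--             return -1
--         a //= 2
--         b //= 2
--         c //= 2
--         k -= 1
--         shift += 1
--     if k <= 0:
--         x = -1
--     elif k == 1:
--         x = 0 if c % 2 == 0 else -1
--     elif a % 2 == 0:
--         x = (-c * pow(b, -1, 1 << k)) % (1 << k)
--     elif b % 2 == 0:
--         # a odd, b even: the Hensel derivative 2*a*x + b is even for every x,
--         # so bit-lifting never updates x and the answer of the lifting is 0
--         x = 0
--     else:
--         # a odd, b odd: derivative is always odd, lift bit by bit; each partial
--         # root stays below 2**i, so no intermediate masking is needed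
--         x = 0
--         for i in range(k):
--             if (a * x * x + b * x + c) % (1 << (i + 1)) != 0:
--                 x += 1 << i
--     # x < 2**k and k + shift is the original level, so x << shift < 2**(original k):
--     # the result already lies in range and needs no final mask
--     return -1 if x == -1 else x << shift
-- ===== Notes on version B (the rewrite author's own statement) =====
-- stated objective: alternative
-- what changed: A's recursive descent on the all-even case becomes an iterative while-loop with a shift accumulator and one final shift (the final mask is dropped: the root provably already lies below 2^k), and the Hensel bit-lifting loop is simplified: the derivative parity test is hoisted out as an a-odd/b-parity case split and the per-step masking of the partial root is dropped since each partial root stays below 2^i.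
import Mathlib
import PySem

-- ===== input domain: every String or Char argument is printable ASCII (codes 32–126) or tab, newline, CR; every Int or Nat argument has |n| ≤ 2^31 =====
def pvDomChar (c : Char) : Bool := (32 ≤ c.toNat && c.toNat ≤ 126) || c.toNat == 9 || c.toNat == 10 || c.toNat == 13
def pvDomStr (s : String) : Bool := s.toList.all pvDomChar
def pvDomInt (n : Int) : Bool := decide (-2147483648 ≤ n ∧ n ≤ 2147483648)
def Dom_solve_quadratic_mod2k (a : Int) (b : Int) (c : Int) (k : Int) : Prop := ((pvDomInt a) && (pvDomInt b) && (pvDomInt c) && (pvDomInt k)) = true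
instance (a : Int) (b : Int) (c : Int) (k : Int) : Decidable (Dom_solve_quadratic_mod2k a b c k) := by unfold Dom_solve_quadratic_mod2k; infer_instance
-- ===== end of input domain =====

-- B replaces A's recursion on the all-even case by an iterative descent with one final
-- shift-and-mask, and simplifies the Hensel lifting loop (alternative decomposition).

-- ===== PORT A =====

-- Python `1 << k`; exact for 0 ≤ k (every use below has 1 ≤ k)
def pow2 (k : Int) : Int := (2 : Int) ^ k.toNat

def safe_mod (a m : Int) : Int := if m = 0 then -1 else PySem.Int.mod a m

-- hand port of Python `pow(b, -1, m)` for odd b and m = 2^k (the only use): Newton/Hensel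
-- iteration x ← x·(2 − b·x) started at 1, with precision doubling from 2^1 up to ≥ 2^k;
-- exact because the inverse mod m is unique, each step doubles the correct low bits, and
-- the fuel (≥ log₂ k doubling steps) always suffices
def pymodinvGo (b m : Int) (k : Nat) : Nat → Int → Nat → Int
  | 0, x, _ => PySem.Int.mod x m
  | fuel + 1, x, p =>
      if k ≤ p then PySem.Int.mod x m
      else pymodinvGo b m k fuel (PySem.Int.mod (x * (2 - b * x)) ((2 : Int) ^ (2 * p))) (2 * p)

-- pymodinv2k b k = Python's pow(b, -1, 1 << k) for odd b
def pymodinv2k (b : Int) (k : Nat) : Int :=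
  pymodinvGo b ((2 : Int) ^ k) k k 1 1

-- one iteration of A's for-loop over range(k)
def aStep (a b c k : Int) (x : Int) (i : Nat) : Int :=
  let px := safe_mod (a * x * x + b * x + c) ((2 : Int) ^ (i + 1))
  if px ≠ 0 ∧ safe_mod (a * 2 * x + b) 2 = 1 then safe_mod (x + (2 : Int) ^ i) (pow2 k) else x

def aLoop (a b c k : Int) : Int := (List.range k.toNat).foldl (aStep a b c k) 0

def solve_quadratic_mod2k (a : Int) (b : Int) (c : Int) (k : Int) : Int :=
  if k ≤ 0 then -1
  else if k = 1 then (if PySem.Int.mod c 2 = 0 then 0 else -1)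
  else if PySem.Int.mod a 2 = PySem.Int.mod b 2 ∧ PySem.Int.mod b 2 = 0 then
    if PySem.Int.mod c 2 = 1 then -1
    else
      let x := solve_quadratic_mod2k (PySem.Int.floordiv a 2) (PySem.Int.floordiv b 2)
                 (PySem.Int.floordiv c 2) (k - 1)
      if x = -1 then -1 else safe_mod (x * 2) (pow2 k)
  else if PySem.Int.mod a 2 = 0 then
    if PySem.Int.mod b 2 = 0 then -1
    else safe_mod (-c * pymodinv2k b k.toNat) (pow2 k)   -- ValueError impossible: b is odd here
  else aLoop a b c k
termination_by k.toNat
decreasing_by omega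

-- ===== PORT B =====

-- one iteration of B's simplified lifting loop
def bStep (a b c : Int) (x : Int) (i : Nat) : Int :=
  if PySem.Int.mod (a * x * x + b * x + c) ((2 : Int) ^ (i + 1)) ≠ 0 then x + (2 : Int) ^ i else x

def bLoop (a b c k : Int) : Int := (List.range k.toNat).foldl (bStep a b c) 0

-- B's while-loop: halve a,b,c while k>1 and a,b both even; none = the mid-descent `return -1`
def altDescend (a b c k : Int) (shift : Nat) : Option (Int × Int × Int × Int × Nat) :=
  if 1 < k ∧ PySem.Int.mod a 2 = 0 ∧ PySem.Int.mod b 2 = 0 then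
    if PySem.Int.mod c 2 = 1 then none
    else altDescend (PySem.Int.floordiv a 2) (PySem.Int.floordiv b 2)
           (PySem.Int.floordiv c 2) (k - 1) (shift + 1)
  else some (a, b, c, k, shift)
termination_by k.toNat
decreasing_by omega

-- B's if/elif chain computing x on the reduced values
def altCore (a b c k : Int) : Int :=
  if k ≤ 0 then -1
  else if k = 1 then (if PySem.Int.mod c 2 = 0 then 0 else -1)
  else if PySem.Int.mod a 2 = 0 then PySem.Int.mod (-c * pymodinv2k b k.toNat) (pow2 k)
  else if PySem.Int.mod b 2 = 0 then 0
  else bLoop a b c k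

-- B's final line: `return -1 if x == -1 else x << shift`
def altFinish : Option (Int × Int × Int × Int × Nat) → Int
  | none => -1
  | some (a', b', c', k', s) =>
    let x := altCore a' b' c' k'
    if x = -1 then -1 else x * (2 : Int) ^ s

def solve_quadratic_mod2k_alt (a : Int) (b : Int) (c : Int) (k : Int) : Int :=
  altFinish (altDescend a b c k 0)

-- ===== PRECONDITION & SPEC =====
def Spec_solve_quadratic_mod2k (a : Int) (b : Int) (c : Int) (k : Int) (out : Int) : Prop := out = solve_quadratic_mod2k_alt a b c k
instance (a : Int) (b : Int) (c : Int) (k : Int) (out : Int) : Decidable (Spec_solve_quadratic_mod2k a b c k out) := by unfold Spec_solve_quadratic_mod2k; infer_instance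

-- ===== CLAIM (what is proved, stated in full; the proofs are below) =====
def Claim_equal_solve_quadratic_mod2k : Prop := ∀ (a : Int) (b : Int) (c : Int) (k : Int), Dom_solve_quadratic_mod2k a b c k → Spec_solve_quadratic_mod2k a b c k (solve_quadratic_mod2k a b c k)

-- ===== LEMMAS AND PROOFS =====

theorem pow2_pos (k : Int) : 0 < pow2 k := pow_pos (by norm_num) _

theorem imod2 (x : Int) : PySem.Int.mod x 2 = x % 2 :=
  PySem.Int.mod_eq_emod_of_pos (by norm_num)

theorem imod_pow2 (x k : Int) : PySem.Int.mod x (pow2 k) = x % pow2 k :=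
  PySem.Int.mod_eq_emod_of_pos (pow2_pos k)

theorem safe_mod_pow2 (x k : Int) : safe_mod x (pow2 k) = x % pow2 k := by
  unfold safe_mod
  rw [if_neg (by have := pow2_pos k; omega), imod_pow2]

-- the state of B's lifting loop stays in [0, 2^n) after n iterations
theorem bLoop_bounds (a b c : Int) (n : Nat) :
    0 ≤ (List.range n).foldl (bStep a b c) 0 ∧
      (List.range n).foldl (bStep a b c) 0 < 2 ^ n := by
  induction n with
  | zero => simp
  | succ n ih =>
    rw [List.range_succ, List.foldl_append]
    have h2 : (2 : Int) ^ (n + 1) = 2 * 2 ^ n := by ring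
    simp only [List.foldl_cons, List.foldl_nil, bStep]
    split <;> omega

-- with b odd, A's lifting step equals B's on every in-range state
theorem step_eq_odd (a b c k x : Int) (n : Nat) (hb : PySem.Int.mod b 2 = 1)
    (hx0 : 0 ≤ x) (hxn : x < 2 ^ n) (hn : n + 1 ≤ k.toNat) :
    aStep a b c k x n = bStep a b c x n := by
  unfold aStep bStep
  have hd : safe_mod (a * 2 * x + b) 2 = 1 := by
    unfold safe_mod
    rw [if_neg (by norm_num), imod2, show a * 2 * x + b = b + 2 * (a * x) by ring,
      Int.add_mul_emod_self_left]
    rw [imod2] at hb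
    exact hb
  have hpx : safe_mod (a * x * x + b * x + c) ((2 : Int) ^ (n + 1)) =
      PySem.Int.mod (a * x * x + b * x + c) ((2 : Int) ^ (n + 1)) := by
    unfold safe_mod
    rw [if_neg (by positivity)]
  have hup : safe_mod (x + (2 : Int) ^ n) (pow2 k) = x + 2 ^ n := by
    rw [safe_mod_pow2]
    have h2n : (0:Int) < 2 ^ n := by positivity
    apply Int.emod_eq_of_lt (by omega)
    have hle : (2 : Int) ^ (n + 1) ≤ 2 ^ k.toNat :=
      pow_le_pow_right₀ (by norm_num) hn
    have h2 : (2 : Int) ^ (n + 1) = 2 * 2 ^ n := by ring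
    unfold pow2
    omega
  rw [hpx, hd, hup]
  simp only [and_true]

theorem loops_eq_odd (a b c k : Int) (hb : PySem.Int.mod b 2 = 1) :
    ∀ n, n ≤ k.toNat →
      (List.range n).foldl (aStep a b c k) 0 = (List.range n).foldl (bStep a b c) 0 := by
  intro n
  induction n with
  | zero => simp
  | succ n ih =>
    intro hn
    rw [List.range_succ, List.foldl_append, List.foldl_append, ih (by omega)]
    simp only [List.foldl_cons, List.foldl_nil]
    have hbnd := bLoop_bounds a b c n
    exact step_eq_odd a b c k _ n hb hbnd.1 hbnd.2 hn

-- with b even, A's lifting loop never updates: 2*a*x + b is even for every x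
theorem aLoop_even (a b c k : Int) (hb : PySem.Int.mod b 2 = 0) :
    ∀ n, (List.range n).foldl (aStep a b c k) 0 = 0 := by
  intro n
  induction n with
  | zero => simp
  | succ n ih =>
    rw [List.range_succ, List.foldl_append, ih]
    simp only [List.foldl_cons, List.foldl_nil, aStep]
    have hd : safe_mod (a * 2 * 0 + b) 2 ≠ 1 := by
      unfold safe_mod
      rw [if_neg (by norm_num), imod2]
      rw [imod2] at hb
      omega
    rw [if_neg (by tauto)]

-- outside the all-even-with-k>1 case, A computes exactly B's core chain
theorem A_eq_core (a b c k : Int)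
    (h : ¬(1 < k ∧ PySem.Int.mod a 2 = 0 ∧ PySem.Int.mod b 2 = 0)) :
    solve_quadratic_mod2k a b c k = altCore a b c k := by
  rw [solve_quadratic_mod2k, altCore]
  by_cases h0 : k ≤ 0
  · simp [h0]
  by_cases h1 : k = 1
  · simp [h1]
  have hk : 1 < k := by omega
  have ha2 := imod2 a; have hb2 := imod2 b
  have hchain : ¬(PySem.Int.mod a 2 = PySem.Int.mod b 2 ∧ PySem.Int.mod b 2 = 0) := by
    rintro ⟨h1', h2'⟩; exact h ⟨hk, by omega, h2'⟩
  rw [if_neg h0, if_neg h1, if_neg hchain, if_neg h0, if_neg h1]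
  by_cases ha : PySem.Int.mod a 2 = 0
  · have hbodd : PySem.Int.mod b 2 ≠ 0 := fun hb => h ⟨hk, ha, hb⟩
    rw [if_pos ha, if_neg hbodd, if_pos ha, safe_mod_pow2, imod_pow2]
  · rw [if_neg ha, if_neg ha]
    by_cases hb : PySem.Int.mod b 2 = 0
    · rw [if_pos hb]
      exact aLoop_even a b c k hb k.toNat
    · rw [if_neg hb]
      have hbodd : PySem.Int.mod b 2 = 1 := by omega
      exact loops_eq_odd a b c k hbodd k.toNat le_rfl

-- B's core is -1 or lies in [0, 2^k)
theorem altCore_range (a b c k : Int) :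
    altCore a b c k = -1 ∨ (0 ≤ altCore a b c k ∧ altCore a b c k < pow2 k) := by
  unfold altCore
  by_cases h0 : k ≤ 0
  · simp [h0]
  by_cases h1 : k = 1
  · subst h1
    norm_num [pow2]
    split_ifs <;> omega
  rw [if_neg h0, if_neg h1]
  by_cases ha : PySem.Int.mod a 2 = 0
  · rw [if_pos ha, imod_pow2]
    right
    exact ⟨Int.emod_nonneg _ (by have := pow2_pos k; omega), Int.emod_lt_of_pos _ (pow2_pos k)⟩
  · rw [if_neg ha]
    by_cases hb : PySem.Int.mod b 2 = 0
    · rw [if_pos hb]; right; exact ⟨le_rfl, pow2_pos k⟩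
    · rw [if_neg hb]; right
      exact bLoop_bounds a b c k.toNat

-- the shift accumulator only tags along: descending with shift s+1 bumps the result's shift
theorem altDescend_succ (a b c k : Int) (s : Nat) :
    altDescend a b c k (s + 1) =
      (altDescend a b c k s).map (fun t => (t.1, t.2.1, t.2.2.1, t.2.2.2.1, t.2.2.2.2 + 1)) := by
  rw [altDescend]
  conv_rhs => rw [altDescend]
  by_cases h : 1 < k ∧ PySem.Int.mod a 2 = 0 ∧ PySem.Int.mod b 2 = 0
  · rw [if_pos h, if_pos h]
    by_cases hc : PySem.Int.mod c 2 = 1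
    · rw [if_pos hc, if_pos hc]; rfl
    · rw [if_neg hc, if_neg hc]
      exact altDescend_succ _ _ _ _ (s + 1)
  · rw [if_neg h, if_neg h]; rfl
termination_by k.toNat
decreasing_by omega

-- descent invariant: reduced level plus accumulated shift equals the starting ones
theorem altDescend_some (a b c k : Int) (s : Nat) (a' b' c' k' : Int) (s' : Nat)
    (h : altDescend a b c k s = some (a', b', c', k', s')) : k'.toNat + s' = k.toNat + s := by
  rw [altDescend] at h
  split at h
  · split at h
    · exact absurd h (by simp)
    · have := altDescend_some _ _ _ _ _ _ _ _ _ _ h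
      omega
  · simp only [Option.some.injEq, Prod.mk.injEq] at h
    obtain ⟨-, -, -, hk', hs'⟩ := h
    omega
termination_by k.toNat
decreasing_by omega

-- when no descent step fires, B is A's value (A = core, and the 0-shift mask is the identity)
theorem eq_of_no_descent (a b c k : Int)
    (h : ¬(1 < k ∧ PySem.Int.mod a 2 = 0 ∧ PySem.Int.mod b 2 = 0)) :
    solve_quadratic_mod2k a b c k = solve_quadratic_mod2k_alt a b c k := by
  rw [A_eq_core a b c k h]
  unfold solve_quadratic_mod2k_alt
  rw [altDescend, if_neg h]
  rcases altCore_range a b c k with hr | hr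
  · simp [altFinish, hr]
  · simp only [altFinish]
    rw [if_neg (by omega), pow_zero, mul_one]

theorem main_eq : ∀ (n : Nat) (a b c k : Int), k.toNat ≤ n →
    solve_quadratic_mod2k a b c k = solve_quadratic_mod2k_alt a b c k := by
  intro n
  induction n with
  | zero =>
    intro a b c k hk
    exact eq_of_no_descent a b c k (by rintro ⟨h1, -⟩; omega)
  | succ n ih =>
    intro a b c k hk
    by_cases h : 1 < k ∧ PySem.Int.mod a 2 = 0 ∧ PySem.Int.mod b 2 = 0
    · obtain ⟨hk1, ha, hb⟩ := h
      have hab : PySem.Int.mod a 2 = PySem.Int.mod b 2 := by rw [ha, hb]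
      rw [solve_quadratic_mod2k]
      rw [if_neg (show ¬k ≤ 0 by omega), if_neg (show ¬k = 1 by omega), if_pos ⟨hab, hb⟩]
      unfold solve_quadratic_mod2k_alt
      have hcond : 1 < k ∧ PySem.Int.mod a 2 = 0 ∧ PySem.Int.mod b 2 = 0 := ⟨hk1, ha, hb⟩
      rw [altDescend, if_pos hcond]
      by_cases hc : PySem.Int.mod c 2 = 1
      · rw [if_pos hc, if_pos hc]; rfl
      · rw [if_neg hc, if_neg hc]
        rw [ih (PySem.Int.floordiv a 2) (PySem.Int.floordiv b 2) (PySem.Int.floordiv c 2)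
              (k - 1) (by omega)]
        rw [altDescend_succ]
        unfold solve_quadratic_mod2k_alt
        rcases hd : altDescend (PySem.Int.floordiv a 2) (PySem.Int.floordiv b 2)
            (PySem.Int.floordiv c 2) (k - 1) 0 with - | ⟨a', b', c', k', s⟩
        · simp [altFinish]
        · have hinv := altDescend_some _ _ _ _ _ _ _ _ _ _ hd
          simp only [Option.map_some, altFinish]
          rcases altCore_range a' b' c' k' with hr | hr
          · simp [hr]
          · have hx : altCore a' b' c' k' ≠ -1 := by omega
            have hbig : altCore a' b' c' k' * (2 : Int) ^ s < pow2 (k - 1) := by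
              calc altCore a' b' c' k' * (2 : Int) ^ s
                  < pow2 k' * 2 ^ s := mul_lt_mul_of_pos_right hr.2 (by positivity)
                _ = 2 ^ (k'.toNat + s) := by rw [pow2, pow_add]
                _ = pow2 (k - 1) := by rw [pow2, show k'.toNat + s = (k - 1).toNat by omega]
            have hnn : 0 ≤ altCore a' b' c' k' * (2 : Int) ^ s :=
              mul_nonneg hr.1 (by positivity)
            have hk2 : pow2 k = 2 * pow2 (k - 1) := by
              rw [pow2, pow2, show k.toNat = (k - 1).toNat + 1 by omega, pow_succ]
              ring
            rw [if_neg hx]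
            rw [if_neg (show ¬altCore a' b' c' k' * (2 : Int) ^ s = -1 by omega)]
            rw [if_neg hx, safe_mod_pow2]
            rw [show altCore a' b' c' k' * (2 : Int) ^ s * 2 =
                  altCore a' b' c' k' * (2 : Int) ^ (s + 1) by ring]
            apply Int.emod_eq_of_lt (by rw [show altCore a' b' c' k' * (2 : Int) ^ (s + 1) =
                altCore a' b' c' k' * (2 : Int) ^ s * 2 by ring]; omega)
            rw [show altCore a' b' c' k' * (2 : Int) ^ (s + 1) =
                altCore a' b' c' k' * (2 : Int) ^ s * 2 by ring, hk2]
            omega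
    · exact eq_of_no_descent a b c k h

-- ===== VERDICT (by name: the statement is the Claim_ definition above) =====
theorem solve_quadratic_mod2k_spec : Claim_equal_solve_quadratic_mod2k := by
  intro a b c k _
  exact main_eq k.toNat a b c k le_rfl
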